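-- pv_equiv track=rewrite | github.com/nermadie/CodeForces_Solutions | CodeforcesRound905Div3/prob03.py | solve
-- ===== SOURCE A (Python) =====
-- def solve(n, k, a):
--     if k == 4:
--         if n == 1:
--             return 4 - (a[0] % 4)
--         count2 = 0
--         count3 = 0
--         for item in a:
--             remainder = item % 4
--             if remainder == 0:
--                 return 0
--             elif remainder == 2:
--                 count2 += 1
--                 if count2 == 2:
--                     return 0
--             elif remainder == 3:
--                 count3 = 1
--         if count3 == 1 or count2 == 1:
--             return 1
--         return 2
--
--     else:
--         product = 1
--         max_remainder = 0
--
--         for i in range(n):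
--             if a[i] % k == 0:
--                 return 0
--             else:
--                 max_remainder = max(max_remainder, a[i] % k)
--
--         return k - max_remainder
-- ===== SOURCE B (Python) =====
-- def solve(n, k, a):
--     if k != 4:
--         # cheapest single-element fix among the first n elements (k if there are none)
--         return min(((k - a[i] % k) % k for i in range(n)), default=k)
--     if n == 1:
--         return (4 - a[0] % 4) % 4
--     # k == 4, n >= 2: either make one element divisible by 4 ...
--     c1 = min((4 - x % 4) % 4 for x in a)
--     # ... or make two elements even: the two smallest per-element even-costs
--     costs = sorted(0 if x % 4 in (0, 2) else 1 for x in a)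
--     return min(c1, costs[0] + costs[1])
-- ===== Notes on version B (the rewrite author's own statement) =====
-- stated objective: alternative
-- what changed: Replaces A's stateful early-return scans by closed-form candidate costs: for k==4 the answer is min(cheapest single-element fix, sum of the two smallest make-it-even costs) computed from the whole array, and for other k the minimum of (k - a[i]%k) % k over range(n) with default k.
-- intended difference: When k == 4, n == 1 and a[0] is a multiple of 4, A returns 4 although the product is already divisible by 4; B returns the intended 0. — e.g. on solve(1, 4, [8]): A returns 4, B returns 0
-- outside the precondition, e.g. on solve(2, -3, [1, 1]): A returns -3, B returns -1; on solve(0, 4, []): A returns 2, B raises ValueError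
import Mathlib
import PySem

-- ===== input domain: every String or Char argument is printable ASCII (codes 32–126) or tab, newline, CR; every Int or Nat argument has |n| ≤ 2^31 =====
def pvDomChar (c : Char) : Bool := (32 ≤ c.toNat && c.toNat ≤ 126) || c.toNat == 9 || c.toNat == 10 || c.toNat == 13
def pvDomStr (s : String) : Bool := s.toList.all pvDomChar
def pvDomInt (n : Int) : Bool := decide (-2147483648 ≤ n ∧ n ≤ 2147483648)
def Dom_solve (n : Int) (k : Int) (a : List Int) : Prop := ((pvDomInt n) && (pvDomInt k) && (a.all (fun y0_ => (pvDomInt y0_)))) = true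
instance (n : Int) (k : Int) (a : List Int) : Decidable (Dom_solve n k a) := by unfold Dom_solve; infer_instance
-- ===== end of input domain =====

-- B replaces A's stateful early-return scans by closed-form candidate costs (min over per-element
-- fix costs); equivalence of the RETURN value is proved on Pre_solve, with one intended difference D_solve.

-- ===== PORT A =====

-- the k == 4 loop of A: early returns become recursion results
def solveLoop4 (l : List Int) (count2 count3 : Int) : Int :=
  match l with
  | [] => if count3 = 1 ∨ count2 = 1 then 1 else 2
  | item :: rest =>
    let remainder := PySem.Int.mod item 4
    if remainder = 0 then 0
    else if remainder = 2 then
      (if count2 + 1 = 2 then 0 else solveLoop4 rest (count2 + 1) count3)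
    else if remainder = 3 then solveLoop4 rest count2 1
    else solveLoop4 rest count2 count3

-- the k != 4 loop of A over 'for i in range(n)'; a[i] out of range (IndexError) is excluded by Pre_
def solveLoopK (k : Int) (a : List Int) (idxs : List Int) (maxRemainder : Int) : Int :=
  match idxs with
  | [] => k - maxRemainder
  | i :: rest =>
    match PySem.List.pyGet? a i with
    | none => 0  -- IndexError in Python; unreachable under Pre_solve
    | some x =>
      if PySem.Int.mod x k = 0 then 0
      else solveLoopK k a rest (max maxRemainder (PySem.Int.mod x k))

def solve (n : Int) (k : Int) (a : List Int) : Int :=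
  if k = 4 then
    if n = 1 then
      match PySem.List.pyGet? a 0 with
      | none => 0  -- IndexError in Python; unreachable under Pre_solve
      | some x => 4 - PySem.Int.mod x 4
    else solveLoop4 a 0 0
  else solveLoopK k a (PySem.List.pyRange 0 n 1) 0

-- ===== PORT B =====

def solve_alt (n : Int) (k : Int) (a : List Int) : Int :=
  if k ≠ 4 then
    -- min(((k - a[i] % k) % k for i in range(n)), default=k); a[i] IndexError excluded by Pre_
    (PySem.List.min? ((PySem.List.pyRange 0 n 1).map
        (fun i => PySem.Int.mod (k - PySem.Int.mod (PySem.List.pyGetD a i 0) k) k))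
      (fun y => y)).getD k
  else if n = 1 then
    match PySem.List.pyGet? a 0 with
    | none => 0  -- IndexError in Python; unreachable under Pre_solve
    | some x => PySem.Int.mod (4 - PySem.Int.mod x 4) 4
  else
    let c1 := (PySem.List.min? (a.map
        (fun x => PySem.Int.mod (4 - PySem.Int.mod x 4) 4)) (fun y => y)).getD 0
    let costs := PySem.List.sorted (a.map
        (fun x => if PySem.Int.mod x 4 = 0 ∨ PySem.Int.mod x 4 = 2 then (0 : Int) else 1))
      (fun y => y) false
    min c1 (costs.getD 0 0 + costs.getD 1 0)

-- ===== PRECONDITION & SPEC =====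

-- Pre_ excludes inputs where a version raises (k = 0 or n > len(a) in A's k ≠ 4 branch; B's min/
-- costs indexing for k = 4 with fewer than the elements it needs, or its empty min for 1 ≤ n) and
-- two artefact corners on which A still returns: a negative modulus k with 1 ≤ n ≤ len(a) (A's
-- floor-mod then yields k itself), and k = 4 with n ≠ 1 but fewer than 2 elements.
def Pre_solve (n : Int) (k : Int) (a : List Int) : Prop :=
  (k = 4 ∧ ((n = 1 ∧ 1 ≤ (a.length : Int)) ∨ (¬ n = 1 ∧ 2 ≤ (a.length : Int)))) ∨
  (¬ k = 4 ∧ n ≤ (a.length : Int) ∧ (1 ≤ n → 1 ≤ k))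
instance (n : Int) (k : Int) (a : List Int) : Decidable (Pre_solve n k a) := by
  unfold Pre_solve; infer_instance

def pvWitness_solve : Int × Int × List Int := (3, 4, [5, 6, 7])

-- When k == 4, n == 1 and a[0] is a multiple of 4, A returns 4 although the product is already
-- divisible by 4; B returns the intended 0.
def D_solve (n : Int) (k : Int) (a : List Int) : Prop :=
  k = 4 ∧ n = 1 ∧ PySem.Int.mod (a.headD 1) 4 = 0
instance (n : Int) (k : Int) (a : List Int) : Decidable (D_solve n k a) := by
  unfold D_solve; infer_instance

def Spec_solve (n : Int) (k : Int) (a : List Int) (out : Int) : Prop :=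
  ¬ D_solve n k a → out = solve_alt n k a
instance (n : Int) (k : Int) (a : List Int) (out : Int) : Decidable (Spec_solve n k a out) := by
  unfold Spec_solve; infer_instance

def pvDiffWitness_solve : Int × Int × List Int := (1, 4, [8])
def pvDiffWitnessOut_solve : Int × Int := (4, 0)

-- ===== CLAIM (what is proved, stated in full; the proofs are below) =====
def Claim_unchanged_solve : Prop := ∀ (n : Int) (k : Int) (a : List Int), Dom_solve n k a → Pre_solve n k a → Spec_solve n k a (solve n k a)
def Claim_changed_solve : Prop := Dom_solve (pvDiffWitness_solve.1) (pvDiffWitness_solve.2.1) (pvDiffWitness_solve.2.2) ∧ Pre_solve (pvDiffWitness_solve.1) (pvDiffWitness_solve.2.1) (pvDiffWitness_solve.2.2) ∧ D_solve (pvDiffWitness_solve.1) (pvDiffWitness_solve.2.1) (pvDiffWitness_solve.2.2) ∧ solve (pvDiffWitness_solve.1) (pvDiffWitness_solve.2.1) (pvDiffWitness_solve.2.2) = pvDiffWitnessOut_solve.1 ∧ solve_alt (pvDiffWitness_solve.1) (pvDiffWitness_solve.2.1) (pvDiffWitness_solve.2.2) = pvDiffWitnessOut_solve.2 ∧ pvDiffWitnessOut_solve.1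 ≠ pvDiffWitnessOut_solve.2
def Claim_exact_solve : Prop := ∀ (n : Int) (k : Int) (a : List Int), Dom_solve n k a → Pre_solve n k a → D_solve n k a → solve n k a ≠ solve_alt n k a

-- ===== LEMMAS AND PROOFS =====

-- generic: foldl min with an initial value below every element
theorem pvFoldlMinConst (l : List Int) (c : Int) (h : ∀ y ∈ l, c ≤ y) : l.foldl min c = c := by
  induction l generalizing c with
  | nil => rfl
  | cons x t ih =>
    simp only [List.foldl_cons]
    rw [min_eq_left (h x (by simp))]
    exact ih c fun y hy => h y (by simp [hy])

-- generic: the value of Python min() on a nonempty list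
theorem pvMinGetD (l : List Int) (m : Int) (hmem : m ∈ l) (hle : ∀ y ∈ l, m ≤ y) :
    (PySem.List.min? l (fun y => y)).getD 0 = m := by
  cases h : PySem.List.min? l (fun y => y) with
  | none =>
    rw [PySem.List.min?_eq_none_iff] at h
    subst h; cases hmem
  | some v =>
    have h1 : v ∈ l := PySem.List.min?_mem h
    have h2 := PySem.List.min?_isMin h
    have := h2 m hmem
    have := hle v h1
    simp at *
    omega

-- mod x 4 is one of 0,1,2,3
theorem pvMod4_cases (x : Int) :
    PySem.Int.mod x 4 = 0 ∨ PySem.Int.mod x 4 = 1 ∨ PySem.Int.mod x 4 = 2 ∨ PySem.Int.mod x 4 = 3 := by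
  rw [PySem.Int.mod_eq_emod_of_pos (by norm_num)]
  have h1 := Int.emod_nonneg x (b := 4) (by norm_num)
  have h2 := Int.emod_lt_of_pos x (b := 4) (by norm_num)
  omega

-- value of the k = 4 single-element cost (4 - x%4) % 4
theorem pvF4_val (x : Int) :
    PySem.Int.mod (4 - PySem.Int.mod x 4) 4 =
      if PySem.Int.mod x 4 = 0 then 0 else 4 - PySem.Int.mod x 4 := by
  rcases pvMod4_cases x with h | h | h | h <;> rw [h] <;> decide

-- counts of residues mod 4
def pvCnt (r : Int) (a : List Int) : Nat := a.countP (fun x => decide (PySem.Int.mod x 4 = r))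

theorem pvCnt_cons_eq (r x : Int) (t : List Int) (h : PySem.Int.mod x 4 = r) :
    pvCnt r (x :: t) = pvCnt r t + 1 := by
  have h' : x % 4 = r := by
    rw [← PySem.Int.mod_eq_emod_of_pos (a := x) (by norm_num : (0:Int) < 4)]; exact h
  simp [pvCnt, h']

theorem pvCnt_cons_ne (r x : Int) (t : List Int) (h : PySem.Int.mod x 4 ≠ r) :
    pvCnt r (x :: t) = pvCnt r t := by
  have h' : ¬ x % 4 = r := by
    rw [← PySem.Int.mod_eq_emod_of_pos (a := x) (by norm_num : (0:Int) < 4)]; exact h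
  simp [pvCnt, h']

theorem pvLoop4_cons (x : Int) (t : List Int) (c2 c3 : Int) :
    solveLoop4 (x :: t) c2 c3 =
      (if PySem.Int.mod x 4 = 0 then 0
       else if PySem.Int.mod x 4 = 2 then
         (if c2 + 1 = 2 then 0 else solveLoop4 t (c2 + 1) c3)
       else if PySem.Int.mod x 4 = 3 then solveLoop4 t c2 1
       else solveLoop4 t c2 c3) := rfl

-- A's k = 4 loop, characterised by residue counts
theorem pvLoop4_char (l : List Int) : ∀ c2 c3 : Int, (c2 = 0 ∨ c2 = 1) → (c3 = 0 ∨ c3 = 1) →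
    solveLoop4 l c2 c3 =
      if 0 < pvCnt 0 l ∨ 2 ≤ c2 + (pvCnt 2 l : Int) then 0
      else if c3 = 1 ∨ 0 < pvCnt 3 l ∨ c2 + (pvCnt 2 l : Int) = 1 then 1 else 2 := by
  induction l with
  | nil =>
    intro c2 c3 h2 h3
    simp only [solveLoop4, pvCnt, List.countP_nil]
    split_ifs <;> omega
  | cons x t ih =>
    intro c2 c3 h2 h3
    rcases pvMod4_cases x with h | h | h | h
    · -- r = 0
      simp only [pvLoop4_cons, h,
        pvCnt_cons_eq 0 x t h, pvCnt_cons_ne 2 x t (by rw [h]; decide),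
        pvCnt_cons_ne 3 x t (by rw [h]; decide)]
      norm_num
    · -- r = 1
      simp only [pvLoop4_cons, h,
        pvCnt_cons_ne 0 x t (by rw [h]; decide), pvCnt_cons_ne 2 x t (by rw [h]; decide),
        pvCnt_cons_ne 3 x t (by rw [h]; decide)]
      norm_num
      rw [ih c2 c3 h2 h3]
    · -- r = 2
      rcases h2 with rfl | rfl
      · simp only [pvLoop4_cons, h,
          pvCnt_cons_ne 0 x t (by rw [h]; decide), pvCnt_cons_eq 2 x t h,
          pvCnt_cons_ne 3 x t (by rw [h]; decide)]
        norm_num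
        rw [ih 1 c3 (Or.inr rfl) h3]
        split_ifs <;> omega
      · simp only [pvLoop4_cons, h,
          pvCnt_cons_ne 0 x t (by rw [h]; decide), pvCnt_cons_eq 2 x t h,
          pvCnt_cons_ne 3 x t (by rw [h]; decide)]
        norm_num
    · -- r = 3
      simp only [pvLoop4_cons, h,
        pvCnt_cons_ne 0 x t (by rw [h]; decide), pvCnt_cons_ne 2 x t (by rw [h]; decide),
        pvCnt_cons_eq 3 x t h]
      norm_num
      rw [ih c2 1 h2 (Or.inr rfl)]
      split_ifs <;> omega

-- positive count gives a witness, zero count gives none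
theorem pvCnt_pos {r : Int} {a : List Int} (h : 0 < pvCnt r a) :
    ∃ x ∈ a, PySem.Int.mod x 4 = r := by
  simpa [pvCnt] using List.countP_pos_iff.mp h

theorem pvCnt_zero {r : Int} {a : List Int} (h : pvCnt r a = 0) :
    ∀ x ∈ a, PySem.Int.mod x 4 ≠ r := by
  simpa [pvCnt] using (fun x a => Std.Internal.List.not_of_countP_eq_zero_of_mem h a)

-- B's c1 (min single-element cost for k = 4), characterised by residue counts
theorem pvC1_char (a : List Int) (ha : a ≠ []) :
    (PySem.List.min? (a.map (fun x => PySem.Int.mod (4 - PySem.Int.mod x 4) 4)) (fun y => y)).getD 0 =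
      if 0 < pvCnt 0 a then 0 else if 0 < pvCnt 3 a then 1 else if 0 < pvCnt 2 a then 2 else 3 := by
  have hval : ∀ x : Int, PySem.Int.mod (4 - PySem.Int.mod x 4) 4 =
      if PySem.Int.mod x 4 = 0 then 0 else 4 - PySem.Int.mod x 4 := pvF4_val
  split_ifs with h0 h3 h2
  · obtain ⟨x, hx, hr⟩ := pvCnt_pos h0
    refine pvMinGetD _ 0 ?_ ?_
    · exact List.mem_map.mpr ⟨x, hx, by rw [hval, hr]; norm_num⟩
    · intro y hy
      obtain ⟨z, hz, rfl⟩ := List.mem_map.mp hy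
      rcases pvMod4_cases z with h | h | h | h <;> rw [hval, h] <;> norm_num
  · obtain ⟨x, hx, hr⟩ := pvCnt_pos h3
    refine pvMinGetD _ 1 ?_ ?_
    · exact List.mem_map.mpr ⟨x, hx, by rw [hval, hr]; norm_num⟩
    · intro y hy
      obtain ⟨z, hz, rfl⟩ := List.mem_map.mp hy
      have := pvCnt_zero (r := 0) (by omega) z hz
      rcases pvMod4_cases z with h | h | h | h <;> rw [hval, h] <;> simp_all
  · obtain ⟨x, hx, hr⟩ := pvCnt_pos h2
    refine pvMinGetD _ 2 ?_ ?_
    · exact List.mem_map.mpr ⟨x, hx, by rw [hval, hr]; norm_num⟩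
    · intro y hy
      obtain ⟨z, hz, rfl⟩ := List.mem_map.mp hy
      have hz0 := pvCnt_zero (r := 0) (by omega) z hz
      have hz3 := pvCnt_zero (r := 3) (by omega) z hz
      rcases pvMod4_cases z with h | h | h | h <;> rw [hval, h] <;> simp_all
  · obtain ⟨x, hx⟩ := List.exists_mem_of_ne_nil a ha
    refine pvMinGetD _ 3 ?_ ?_
    · have hz0 := pvCnt_zero (r := 0) (by omega) x hx
      have hz2 := pvCnt_zero (r := 2) (by omega) x hx
      have hz3 := pvCnt_zero (r := 3) (by omega) x hx
      refine List.mem_map.mpr ⟨x, hx, ?_⟩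
      rcases pvMod4_cases x with h | h | h | h <;> rw [hval, h] <;> simp_all
    · intro y hy
      obtain ⟨z, hz, rfl⟩ := List.mem_map.mp hy
      have hz0 := pvCnt_zero (r := 0) (by omega) z hz
      have hz2 := pvCnt_zero (r := 2) (by omega) z hz
      have hz3 := pvCnt_zero (r := 3) (by omega) z hz
      rcases pvMod4_cases z with h | h | h | h <;> rw [hval, h] <;> simp_all

-- a 0/1 list is a permutation of zeros then ones
theorem pvPerm01 (l : List Int) (h : ∀ x ∈ l, x = 0 ∨ x = 1) :
    (List.replicate (l.count 0) (0:Int) ++ List.replicate (l.count 1) (1:Int)).Perm l := by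
  induction l with
  | nil => simp
  | cons x t ih =>
    have ht := ih fun y hy => h y (by simp [hy])
    rcases h x (by simp) with rfl | rfl
    · simp only [List.count_cons_self, List.count_cons_of_ne (by norm_num : (0:Int) ≠ 1),
        List.replicate_succ, List.cons_append]
      exact ht.cons 0
    · rw [List.count_cons_of_ne (by norm_num : (1:Int) ≠ 0), List.count_cons_self,
        List.replicate_succ]
      exact (List.perm_middle).trans (ht.cons 1)


-- the per-element make-it-even cost for k = 4
def pvG (x : Int) : Int := if PySem.Int.mod x 4 = 0 ∨ PySem.Int.mod x 4 = 2 then 0 else 1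

theorem pvG_mem (x : Int) : pvG x = 0 ∨ pvG x = 1 := by
  unfold pvG; split_ifs <;> simp

theorem pvCount0_map (a : List Int) : (a.map pvG).count 0 = pvCnt 0 a + pvCnt 2 a := by
  induction a with
  | nil => rfl
  | cons x t ih =>
    simp only [List.map_cons, List.count_cons, ih]
    rcases pvMod4_cases x with h | h | h | h
    · rw [pvCnt_cons_eq 0 x t h, pvCnt_cons_ne 2 x t (by rw [h]; decide)]
      have hg : pvG x = 0 := by unfold pvG; rw [h]; decide
      rw [hg]; simp; omega
    · rw [pvCnt_cons_ne 0 x t (by rw [h]; decide), pvCnt_cons_ne 2 x t (by rw [h]; decide)]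
      have hg : pvG x = 1 := by unfold pvG; rw [h]; decide
      rw [hg]; simp
    · rw [pvCnt_cons_ne 0 x t (by rw [h]; decide), pvCnt_cons_eq 2 x t h]
      have hg : pvG x = 0 := by unfold pvG; rw [h]; decide
      rw [hg]; simp; omega
    · rw [pvCnt_cons_ne 0 x t (by rw [h]; decide), pvCnt_cons_ne 2 x t (by rw [h]; decide)]
      have hg : pvG x = 1 := by unfold pvG; rw [h]; decide
      rw [hg]; simp

theorem pvCount1_map (a : List Int) : (a.map pvG).count 1 = pvCnt 1 a + pvCnt 3 a := by
  induction a with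
  | nil => rfl
  | cons x t ih =>
    simp only [List.map_cons, List.count_cons, ih]
    rcases pvMod4_cases x with h | h | h | h
    · rw [pvCnt_cons_ne 1 x t (by rw [h]; decide), pvCnt_cons_ne 3 x t (by rw [h]; decide)]
      have hg : pvG x = 0 := by unfold pvG; rw [h]; decide
      rw [hg]; simp
    · rw [pvCnt_cons_eq 1 x t h, pvCnt_cons_ne 3 x t (by rw [h]; decide)]
      have hg : pvG x = 1 := by unfold pvG; rw [h]; decide
      rw [hg]; simp; omega
    · rw [pvCnt_cons_ne 1 x t (by rw [h]; decide), pvCnt_cons_ne 3 x t (by rw [h]; decide)]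
      have hg : pvG x = 0 := by unfold pvG; rw [h]; decide
      rw [hg]; simp
    · rw [pvCnt_cons_ne 1 x t (by rw [h]; decide), pvCnt_cons_eq 3 x t h]
      have hg : pvG x = 1 := by unfold pvG; rw [h]; decide
      rw [hg]; simp; omega

theorem pvCnt_total (a : List Int) :
    pvCnt 0 a + pvCnt 1 a + pvCnt 2 a + pvCnt 3 a = a.length := by
  induction a with
  | nil => rfl
  | cons x t ih =>
    rcases pvMod4_cases x with h | h | h | h <;>
      [ rw [pvCnt_cons_eq 0 x t h, pvCnt_cons_ne 1 x t (by rw [h]; decide),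
            pvCnt_cons_ne 2 x t (by rw [h]; decide), pvCnt_cons_ne 3 x t (by rw [h]; decide)];
        rw [pvCnt_cons_ne 0 x t (by rw [h]; decide), pvCnt_cons_eq 1 x t h,
            pvCnt_cons_ne 2 x t (by rw [h]; decide), pvCnt_cons_ne 3 x t (by rw [h]; decide)];
        rw [pvCnt_cons_ne 0 x t (by rw [h]; decide), pvCnt_cons_ne 1 x t (by rw [h]; decide),
            pvCnt_cons_eq 2 x t h, pvCnt_cons_ne 3 x t (by rw [h]; decide)];
        rw [pvCnt_cons_ne 0 x t (by rw [h]; decide), pvCnt_cons_ne 1 x t (by rw [h]; decide),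
            pvCnt_cons_ne 2 x t (by rw [h]; decide), pvCnt_cons_eq 3 x t h]] <;>
      simp only [List.length_cons] <;> omega

-- sorted costs list is zeros then ones
theorem pvSorted_costs (a : List Int) :
    PySem.List.sorted (a.map pvG) (fun y => y) false =
      List.replicate ((a.map pvG).count 0) (0:Int) ++
        List.replicate ((a.map pvG).count 1) (1:Int) := by
  apply PySem.List.sorted_id_eq_of_perm_of_pairwise
  · exact pvPerm01 _ (fun x hx => by
      obtain ⟨z, _, rfl⟩ := List.mem_map.mp hx; exact pvG_mem z)
  · rw [List.pairwise_append]
    refine ⟨List.pairwise_replicate.mpr (Or.inr le_rfl),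
            List.pairwise_replicate.mpr (Or.inr le_rfl), ?_⟩
    intro x hx y hy
    rw [List.eq_of_mem_replicate hx, List.eq_of_mem_replicate hy]
    norm_num

-- sum of the first two entries of z zeros followed by m ones
theorem pvTwoSmallest (z m : Nat) (h : 2 ≤ z + m) :
    (List.replicate z (0:Int) ++ List.replicate m 1).getD 0 0 +
      (List.replicate z (0:Int) ++ List.replicate m 1).getD 1 0 =
      if 2 ≤ z then 0 else if z = 1 then 1 else 2 := by
  match z, m with
  | 0, 0 => omega
  | 0, 1 => omega
  | 0, (m+2) => simp [List.replicate_succ]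
  | 1, 0 => omega
  | 1, (m+1) => simp [List.replicate_succ]
  | (z+2), m => simp [List.replicate_succ]

-- arithmetic facts for general k
theorem pvModK_bounds (k x : Int) (hk : 0 < k) :
    0 ≤ PySem.Int.mod x k ∧ PySem.Int.mod x k < k := by
  rw [PySem.Int.mod_eq_emod_of_pos hk]
  exact ⟨Int.emod_nonneg x (by omega), Int.emod_lt_of_pos x hk⟩

def pvF (k x : Int) : Int := PySem.Int.mod (k - PySem.Int.mod x k) k

theorem pvF_val (k x : Int) (hk : 0 < k) :
    pvF k x = if PySem.Int.mod x k = 0 then 0 else k - PySem.Int.mod x k := by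
  unfold pvF
  have hb := pvModK_bounds k x hk
  split_ifs with h
  · rw [h, sub_zero, PySem.Int.mod_eq_emod_of_pos hk, Int.emod_self]
  · rw [PySem.Int.mod_eq_emod_of_pos hk, Int.emod_eq_of_lt (by omega) (by omega)]

theorem pvF_bounds (k x : Int) (hk : 0 < k) : 0 ≤ pvF k x ∧ pvF k x ≤ k := by
  rw [pvF_val k x hk]
  have := pvModK_bounds k x hk
  split_ifs <;> omega

-- A's k ≠ 4 loop in list form (proof-side model of solveLoopK)
def pvLoopL (k : Int) : List Int → Int → Int
  | [], m => k - m
  | x :: t, m =>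
    if PySem.Int.mod x k = 0 then 0 else pvLoopL k t (max m (PySem.Int.mod x k))

theorem pvLoopL_eq_foldl (k : Int) (hk : 0 < k) (l : List Int) :
    ∀ m, 0 ≤ m → m < k → pvLoopL k l m = (l.map (pvF k)).foldl min (k - m) := by
  induction l with
  | nil => intro m _ _; rfl
  | cons x t ih =>
    intro m hm0 hmk
    have hb := pvModK_bounds k x hk
    simp only [pvLoopL, List.map_cons, List.foldl_cons]
    split_ifs with h
    · have hf : pvF k x = 0 := by rw [pvF_val k x hk, if_pos h]
      rw [hf, min_eq_right (by omega)]
      exact (pvFoldlMinConst _ 0 (fun y hy => by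
        obtain ⟨z, _, rfl⟩ := List.mem_map.mp hy
        exact (pvF_bounds k z hk).1)).symm
    · have hf : pvF k x = k - PySem.Int.mod x k := by rw [pvF_val k x hk, if_neg h]
      rw [ih (max m (PySem.Int.mod x k)) (by omega) (by omega)]
      congr 1
      rw [hf]
      omega

-- the index loop of solveLoopK traverses the prefix a[:N]
theorem pvLoopK_take (k : Int) (a : List Int) (N : Nat) (hN : N ≤ a.length) :
    ∀ (d j : Nat), N = j + d → ∀ m,
      solveLoopK k a (PySem.List.pyRange (j : Int) (N : Int) 1) m
        = pvLoopL k ((a.take N).drop j) m := by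
  intro d
  induction d with
  | zero =>
    intro j hj m
    rw [PySem.List.pyRange_one_eq_nil (by omega),
        List.drop_of_length_le (by simp; omega)]
    rfl
  | succ d ih =>
    intro j hj m
    have hjN : j < N := by omega
    have hjl : j < a.length := by omega
    have hjt : j < (a.take N).length := by simp; omega
    rw [PySem.List.pyRange_one_cons (by exact_mod_cast hjN),
        List.drop_eq_getElem_cons hjt]
    simp only [solveLoopK, PySem.List.pyGet?_natCast, List.getElem?_eq_getElem hjl,
      pvLoopL, List.getElem_take]
    split_ifs with h
    · rfl
    · have hc : (j : Int) + 1 = ((j + 1 : Nat) : Int) := by push_cast; ring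
      rw [hc, ih (j + 1) (by omega)]

-- the index comprehension of B's k ≠ 4 branch reads the prefix a[:N]
theorem pvIdxMap (a : List Int) (N : Nat) (hN : N ≤ a.length) :
    ∀ (d j : Nat), N = j + d →
      (PySem.List.pyRange (j : Int) (N : Int) 1).map (fun i => PySem.List.pyGetD a i 0)
        = (a.take N).drop j := by
  intro d
  induction d with
  | zero =>
    intro j hj
    rw [PySem.List.pyRange_one_eq_nil (by omega),
        List.drop_of_length_le (by simp; omega)]
    rfl
  | succ d ih =>
    intro j hj
    have hjN : j < N := by omega
    have hjl : j < a.length := by omega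
    have hjt : j < (a.take N).length := by simp; omega
    rw [PySem.List.pyRange_one_cons (by exact_mod_cast hjN), List.map_cons,
        List.drop_eq_getElem_cons hjt]
    have hc : (j : Int) + 1 = ((j + 1 : Nat) : Int) := by push_cast; ring
    rw [hc, ih (j + 1) (by omega)]
    simp [List.getElem_take, PySem.List.pyGetD_natCast, List.getD_eq_getElem?_getD,
      List.getElem?_eq_getElem hjl]

-- B's k ≠ 4 value equals the list-form loop on a nonempty list
theorem pvBranchK (k : Int) (hk : 1 ≤ k) (x : Int) (t : List Int) (d : Int) :
    pvLoopL k (x :: t) 0 =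
      (PySem.List.min? ((x :: t).map (pvF k)) (fun y => y)).getD d := by
  rw [pvLoopL_eq_foldl k (by omega) _ 0 le_rfl (by omega), List.map_cons,
      PySem.List.min?_id_cons]
  simp only [Option.getD_some, List.foldl_cons, sub_zero]
  rw [min_eq_right ((pvF_bounds k x (by omega)).2)]


-- ===== VERDICT =====
theorem solve_spec : Claim_unchanged_solve := by
  intro n k a hdom hpre
  unfold Spec_solve
  intro hnd
  by_cases hk4 : k = 4
  · subst hk4
    rcases hpre with ⟨-, hp⟩ | ⟨hne, -⟩
    · rcases hp with ⟨hone, hlen⟩ | ⟨hone, hlen⟩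
      · -- single-element case (outside D_: a[0] is not a multiple of 4)
        subst hone
        have h1 : 1 ≤ a.length := by omega
        have hane : a ≠ [] := by intro h; rw [h] at h1; simp at h1
        obtain ⟨x, t, rfl⟩ := List.exists_cons_of_ne_nil hane
        have hx : PySem.Int.mod x 4 ≠ 0 := fun h => hnd ⟨rfl, rfl, by simpa using h⟩
        simp only [solve, solve_alt, ne_eq, if_true, not_true_eq_false, if_false,
          PySem.List.pyGet?_zero_cons]
        have hv := pvF_val 4 x (by norm_num)
        unfold pvF at hv
        rw [hv, if_neg hx]
      · -- k = 4 with at least two elements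
        have hlen2 : 2 ≤ a.length := by omega
        have hane : a ≠ [] := by intro h; rw [h] at hlen2; simp at hlen2
        simp only [solve, solve_alt, ne_eq, if_true, not_true_eq_false,
          if_false, if_neg hone]
        rw [pvLoop4_char a 0 0 (Or.inl rfl) (Or.inl rfl), pvC1_char a hane]
        have hg : (fun x => if PySem.Int.mod x 4 = 0 ∨ PySem.Int.mod x 4 = 2
            then (0:Int) else 1) = pvG := rfl
        rw [hg, pvSorted_costs a, pvCount0_map a, pvCount1_map a,
          pvTwoSmallest _ _ (by have := pvCnt_total a; omega)]
        split_ifs <;> omega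
    · exact absurd rfl hne
  · -- k ≠ 4: both sides scan the first n elements
    rcases hpre with ⟨h4, -⟩ | ⟨-, hnlen, hkpos⟩
    · exact absurd h4 hk4
    simp only [solve, solve_alt, ne_eq, if_neg hk4, if_pos hk4]
    by_cases hn1 : 1 ≤ n
    · -- 1 ≤ n ≤ len a, 1 ≤ k
      have hk1 : 1 ≤ k := hkpos hn1
      have hNc : ((n.toNat : Nat) : Int) = n := Int.toNat_of_nonneg (by omega)
      have hNlen : n.toNat ≤ a.length := by omega
      rw [← hNc]
      have hA := pvLoopK_take k a n.toNat hNlen n.toNat 0 (by omega) 0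
      simp only [Nat.cast_zero, List.drop_zero] at hA
      rw [hA]
      have hcomp : (fun i => PySem.Int.mod (k - PySem.Int.mod (PySem.List.pyGetD a i 0) k) k)
          = (pvF k) ∘ (fun i => PySem.List.pyGetD a i 0) := rfl
      rw [hcomp, ← List.map_map]
      have hB := pvIdxMap a n.toNat hNlen n.toNat 0 (by omega)
      simp only [Nat.cast_zero, List.drop_zero] at hB
      rw [hB]
      have hlt : (a.take n.toNat).length = n.toNat := by
        rw [List.length_take]; omega
      have hne : a.take n.toNat ≠ [] := by
        intro h; rw [h] at hlt; simp at hlt; omega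
      obtain ⟨x, t, hxt⟩ := List.exists_cons_of_ne_nil hne
      rw [hxt, pvBranchK k hk1 x t k]
    · -- n ≤ 0: A's loop is empty and B's min falls back to its default k
      rw [PySem.List.pyRange_one_eq_nil (by omega)]
      simp only [solveLoopK, List.map_nil]
      have hmn : PySem.List.min? ([] : List Int) (fun y => y) = none := by
        rw [PySem.List.min?_eq_none_iff]
      rw [hmn, Option.getD_none]
      omega

theorem solve_changed : Claim_changed_solve := by unfold Claim_changed_solve; decide

theorem solve_tight : Claim_exact_solve := by
  intro n k a hdom hpre hd
  obtain ⟨hk4, hone, hmod⟩ := hd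
  subst hk4; subst hone
  have h1 : 1 ≤ a.length := by
    rcases hpre with ⟨-, hp⟩ | ⟨hne, -⟩
    · rcases hp with ⟨-, h⟩ | ⟨h, -⟩ <;> omega
    · exact absurd rfl hne
  have hane : a ≠ [] := by intro h; rw [h] at h1; simp at h1
  obtain ⟨x, t, rfl⟩ := List.exists_cons_of_ne_nil hane
  have hx : PySem.Int.mod x 4 = 0 := by simpa using hmod
  simp only [solve, solve_alt, ne_eq, if_true, not_true_eq_false, if_false,
    PySem.List.pyGet?_zero_cons]
  rw [hx]
  decide
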